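-- pv_equiv track=rewrite | github.com/siruizou2005/ScrollWeaver | experiments/sft/run_full_long_dialogue_4way.py | get_scenarios
-- ===== SOURCE A (Python) =====
-- def get_scenarios(char_key, char_data):
--     """Generate 50 scenarios mixing casual and stress"""
--     stress_prompts = char_data["stress_prompts"]
--     casual_prompts = char_data["casual_prompts"]
--
--     scenarios = []
--     for i in range(50):
--         # 20% stress (Every 5th turn is stress)
--         if i % 5 == 4:
--             prompt = stress_prompts[i // 5 % len(stress_prompts)]
--             s_type = "stress"
--         else:
--             prompt = casual_prompts[i % len(casual_prompts)]
--             s_type = "casual"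
--         scenarios.append({"prompt": prompt, "type": s_type})
--     return scenarios
-- ===== SOURCE B (Python) =====
-- def get_scenarios(char_key, char_data):
--     """Generate 50 scenarios mixing casual and stress"""
--     stress_prompts = char_data["stress_prompts"]
--     casual_prompts = char_data["casual_prompts"]
--
--     # Phase 1: build all 50 turns as casual.
--     scenarios = [{"prompt": casual_prompts[i % len(casual_prompts)], "type": "casual"}
--                  for i in range(50)]
--     # Phase 2: overwrite every 5th turn (positions 4, 9, ..., 49) with stress.
--     for j in range(10):
--         scenarios[5 * j + 4] = {"prompt": stress_prompts[j % len(stress_prompts)],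
--                                 "type": "stress"}
--     return scenarios
-- ===== Notes on version B (the rewrite author's own statement) =====
-- stated objective: alternative
-- what changed: Single 50-step loop with a per-index stress/casual branch replaced by a two-phase build: a comprehension makes all 50 turns casual, then a separate 10-step pass overwrites positions 5j+4 with stress entries.
import Mathlib
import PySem

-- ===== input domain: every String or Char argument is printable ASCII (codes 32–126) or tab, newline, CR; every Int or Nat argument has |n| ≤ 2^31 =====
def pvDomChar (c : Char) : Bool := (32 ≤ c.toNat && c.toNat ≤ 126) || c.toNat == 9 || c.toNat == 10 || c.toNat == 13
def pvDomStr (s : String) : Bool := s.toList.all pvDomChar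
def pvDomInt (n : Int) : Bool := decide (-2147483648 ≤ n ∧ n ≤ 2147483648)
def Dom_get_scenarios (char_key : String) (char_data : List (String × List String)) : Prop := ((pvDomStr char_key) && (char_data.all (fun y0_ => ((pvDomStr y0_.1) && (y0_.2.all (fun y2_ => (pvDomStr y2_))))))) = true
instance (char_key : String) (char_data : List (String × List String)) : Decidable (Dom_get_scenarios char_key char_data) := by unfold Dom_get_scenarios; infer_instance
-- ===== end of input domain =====

-- B replaces A's single 50-step loop with a per-index stress/casual branch by a two-phase build:
-- all 50 turns built casual first, then a separate 10-step pass overwrites positions 5j+4 with stress entries.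

-- ===== PORT A =====
def get_scenarios (char_key : String) (char_data : List (String × List String)) : List (List (String × String)) :=
  let stress_prompts := PySem.Dict.getD (PySem.Dict.mk char_data) "stress_prompts" []
  let casual_prompts := PySem.Dict.getD (PySem.Dict.mk char_data) "casual_prompts" []
  (PySem.List.pyRange 0 50 1).foldl (fun scenarios i =>
    if PySem.Int.mod i 5 = 4 then
      scenarios ++ [[("prompt", PySem.List.pyGetD stress_prompts (PySem.Int.mod (PySem.Int.floordiv i 5) (stress_prompts.length : Int)) ""), ("type", "stress")]]
    else
      scenarios ++ [[("prompt", PySem.List.pyGetD casual_prompts (PySem.Int.mod i (casual_prompts.length : Int)) ""), ("type", "casual")]]) []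

-- ===== PORT B =====
def get_scenarios_alt (char_key : String) (char_data : List (String × List String)) : List (List (String × String)) :=
  let stress_prompts := PySem.Dict.getD (PySem.Dict.mk char_data) "stress_prompts" []
  let casual_prompts := PySem.Dict.getD (PySem.Dict.mk char_data) "casual_prompts" []
  -- phase 1: the all-casual comprehension
  let scenarios := (PySem.List.pyRange 0 50 1).map (fun i =>
    [("prompt", PySem.List.pyGetD casual_prompts (PySem.Int.mod i (casual_prompts.length : Int)) ""), ("type", "casual")])
  -- phase 2: overwrite every 5th slot with a stress entry
  (PySem.List.pyRange 0 10 1).foldl (fun sc j =>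
    PySem.List.pySetD sc (5 * j + 4)
      [("prompt", PySem.List.pyGetD stress_prompts (PySem.Int.mod j (stress_prompts.length : Int)) ""), ("type", "stress")]) scenarios

-- ===== PRECONDITION & SPEC =====
-- Pre_ excludes exactly the inputs on which the Python A raises: a missing "stress_prompts" or
-- "casual_prompts" key (KeyError) or an empty prompt list (ZeroDivisionError from '% len(...)').
def Pre_get_scenarios (char_key : String) (char_data : List (String × List String)) : Prop :=
  PySem.Dict.getD (PySem.Dict.mk char_data) "stress_prompts" [] ≠ [] ∧
  PySem.Dict.getD (PySem.Dict.mk char_data) "casual_prompts" [] ≠ []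
instance (char_key : String) (char_data : List (String × List String)) : Decidable (Pre_get_scenarios char_key char_data) := by unfold Pre_get_scenarios; infer_instance
def pvWitness_get_scenarios : String × (List (String × List String)) :=
  ("k", [("stress_prompts", ["s1", "s2"]), ("casual_prompts", ["c1", "c2", "c3"])])

def Spec_get_scenarios (char_key : String) (char_data : List (String × List String)) (out : List (List (String × String))) : Prop := out = get_scenarios_alt char_key char_data
instance (char_key : String) (char_data : List (String × List String)) (out : List (List (String × String))) : Decidable (Spec_get_scenarios char_key char_data out) := by unfold Spec_get_scenarios; infer_instance

-- ===== CLAIM (what is proved, stated in full; the proofs are below) =====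
def Claim_equal_get_scenarios : Prop := ∀ (char_key : String) (char_data : List (String × List String)), Dom_get_scenarios char_key char_data → Pre_get_scenarios char_key char_data → Spec_get_scenarios char_key char_data (get_scenarios char_key char_data)

-- ===== LEMMAS AND PROOFS =====

-- the casual entry for turn i, the stress entry for stress turn j, and the mixed entry of A
def cEnt (ca : List String) (i : Nat) : List (String × String) :=
  [("prompt", PySem.List.pyGetD ca (PySem.Int.mod (i : Int) (ca.length : Int)) ""), ("type", "casual")]
def sEnt (st : List String) (j : Nat) : List (String × String) :=
  [("prompt", PySem.List.pyGetD st (PySem.Int.mod (j : Int) (st.length : Int)) ""), ("type", "stress")]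
def mEnt (st ca : List String) (i : Nat) : List (String × String) :=
  if PySem.Int.mod (i : Int) 5 = 4 then
    [("prompt", PySem.List.pyGetD st (PySem.Int.mod (PySem.Int.floordiv (i : Int) 5) (st.length : Int)) ""), ("type", "stress")]
  else cEnt ca i

-- the patch pass of B, phrased over Nat
def patch (st : List String) (n : Nat) (l : List (List (String × String))) : List (List (String × String)) :=
  (List.range n).foldl (fun sc j => sc.set (5 * j + 4) (sEnt st j)) l

lemma patch_length (st : List String) (n : Nat) (l : List (List (String × String))) :
    (patch st n l).length = l.length := by
  induction n with
  | zero => rfl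
  | succ n ih => simp [patch, List.range_succ, List.foldl_append] at ih ⊢; simp [ih]

lemma patch_append (st : List String) (n : Nat) (l t : List (List (String × String)))
    (h : 5 * n ≤ l.length) : patch st n (l ++ t) = patch st n l ++ t := by
  induction n with
  | zero => rfl
  | succ n ih =>
    have h' : 5 * n ≤ l.length := by omega
    simp only [patch, List.range_succ, List.foldl_append, List.foldl_cons, List.foldl_nil]
    rw [show (List.range n).foldl (fun sc j => sc.set (5 * j + 4) (sEnt st j)) (l ++ t) = patch st n (l ++ t) from rfl,
        ih h',
        show (List.range n).foldl (fun sc j => sc.set (5 * j + 4) (sEnt st j)) l = patch st n l from rfl,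
        List.set_append_left _ _ (by rw [patch_length]; omega)]

lemma range_five_split (n : Nat) :
    List.range (5 * (n + 1)) = List.range (5 * n) ++ [5 * n, 5 * n + 1, 5 * n + 2, 5 * n + 3, 5 * n + 4] := by
  rw [show 5 * (n + 1) = 5 * n + 5 by ring, List.range_add]
  norm_num [List.range_succ]

lemma mod5_cast (m : Nat) : PySem.Int.mod (m : Int) 5 = ((m % 5 : Nat) : Int) := by
  exact_mod_cast PySem.Int.mod_natCast m 5

lemma div5_cast (m : Nat) : PySem.Int.floordiv (m : Int) 5 = ((m / 5 : Nat) : Int) := by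
  exact_mod_cast PySem.Int.floordiv_natCast m 5

lemma mEnt_not4 (st ca : List String) (i : Nat) (h : i % 5 ≠ 4) : mEnt st ca i = cEnt ca i := by
  rw [mEnt, if_neg]; rw [mod5_cast]; omega

lemma mEnt_at4 (st ca : List String) (j : Nat) : mEnt st ca (5 * j + 4) = sEnt st j := by
  rw [mEnt, if_pos (by rw [mod5_cast]; omega)]
  rw [sEnt, div5_cast, show (5 * j + 4) / 5 = j by omega]

lemma patch_succ (st : List String) (n : Nat) (l : List (List (String × String))) :
    patch st (n + 1) l = (patch st n l).set (5 * n + 4) (sEnt st n) := by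
  simp [patch, List.range_succ]

-- B's two phases produce exactly A's mixed list
lemma patch_eq (st ca : List String) (n : Nat) :
    patch st n ((List.range (5 * n)).map (cEnt ca)) = (List.range (5 * n)).map (mEnt st ca) := by
  induction n with
  | zero => rfl
  | succ n ih =>
    rw [range_five_split, List.map_append, List.map_append, patch_succ,
        patch_append st n _ _ (by simp), ih,
        List.set_append_right _ _ (by simp)]
    simp only [List.length_map, List.length_range]
    rw [show 5 * n + 4 - 5 * n = 4 by omega]
    simp only [List.map_cons, List.map_nil, List.set]
    rw [mEnt_not4 st ca (5 * n) (by omega), mEnt_not4 st ca (5 * n + 1) (by omega),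
        mEnt_not4 st ca (5 * n + 2) (by omega), mEnt_not4 st ca (5 * n + 3) (by omega),
        mEnt_at4 st ca n]

-- ===== VERDICT (by name: the statement is the Claim_ definition above) =====
lemma main_eq (st ca : List String) :
    (PySem.List.pyRange 0 50 1).foldl (fun scenarios i =>
      if PySem.Int.mod i 5 = 4 then
        scenarios ++ [[("prompt", PySem.List.pyGetD st (PySem.Int.mod (PySem.Int.floordiv i 5) (st.length : Int)) ""), ("type", "stress")]]
      else
        scenarios ++ [[("prompt", PySem.List.pyGetD ca (PySem.Int.mod i (ca.length : Int)) ""), ("type", "casual")]]) [] =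
    (PySem.List.pyRange 0 10 1).foldl (fun sc j =>
      PySem.List.pySetD sc (5 * j + 4)
        [("prompt", PySem.List.pyGetD st (PySem.Int.mod j (st.length : Int)) ""), ("type", "stress")])
      ((PySem.List.pyRange 0 50 1).map (fun i =>
        [("prompt", PySem.List.pyGetD ca (PySem.Int.mod i (ca.length : Int)) ""), ("type", "casual")])) := by
  rw [show (50 : Int) = ((50 : Nat) : Int) by norm_num, PySem.List.pyRange_zero_nat,
      show (10 : Int) = ((10 : Nat) : Int) by norm_num, PySem.List.pyRange_zero_nat,
      List.foldl_map, List.foldl_map, List.map_map]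
  -- A's loop body appends one entry per turn: rewrite it to the mixed-entry map
  rw [show (fun (scenarios : List (List (String × String))) (k : Nat) =>
      if PySem.Int.mod (k : Int) 5 = 4 then
        scenarios ++ [[("prompt", PySem.List.pyGetD st (PySem.Int.mod (PySem.Int.floordiv (k : Int) 5) (st.length : Int)) ""), ("type", "stress")]]
      else
        scenarios ++ [[("prompt", PySem.List.pyGetD ca (PySem.Int.mod (k : Int) (ca.length : Int)) ""), ("type", "casual")]]) =
      (fun scenarios k => scenarios ++ [mEnt st ca k]) from by
    funext scenarios k
    simp only [mEnt, cEnt]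
    exact (apply_ite (fun z => scenarios ++ [z]) _ _ _).symm]
  rw [PySem.List.foldl_append_singleton_eq_map, List.nil_append]
  -- B's patch body sets one slot per stress turn: rewrite it to the Nat-indexed patch
  rw [show (fun (sc : List (List (String × String))) (k : Nat) =>
      PySem.List.pySetD sc (5 * (k : Int) + 4)
        [("prompt", PySem.List.pyGetD st (PySem.Int.mod (k : Int) (st.length : Int)) ""), ("type", "stress")]) =
      (fun sc k => sc.set (5 * k + 4) (sEnt st k)) from by
    funext sc k
    rw [show 5 * (k : Int) + 4 = ((5 * k + 4 : Nat) : Int) by push_cast; ring, PySem.List.pySetD_natCast]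
    rfl]
  rw [show ((fun i => [("prompt", PySem.List.pyGetD ca (PySem.Int.mod i (ca.length : Int)) ""), ("type", "casual")]) ∘ fun (k : Nat) => (k : Int)) = cEnt ca from rfl]
  rw [show List.foldl (fun sc k => sc.set (5 * k + 4) (sEnt st k)) ((List.range 50).map (cEnt ca)) (List.range 10) = patch st 10 ((List.range 50).map (cEnt ca)) from rfl,
      show (50 : Nat) = 5 * 10 by norm_num, patch_eq]

-- ===== VERDICT (by name: the statement is the Claim_ definition above) =====
theorem get_scenarios_spec : Claim_equal_get_scenarios := by
  intro ck cd _ _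
  unfold Spec_get_scenarios get_scenarios get_scenarios_alt
  exact main_eq _ _
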